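-- pv_equiv track=rewrite | github.com/hyunjongkimmath/trouver | trouver/markdown/obsidian/personal/machine_learning/tokenize.py | _search_within_seq_for_char
-- ===== SOURCE A (Python) =====
-- def _search_within_seq_for_char(
--         seq_offset: list[tuple[int, int]],
--         char: int
--     ) -> int:
--     """
--     Binary search for the index within the sequence corresponding
--     to the token at the location of the index `char` within the
--     original (raw) text.
--
--     Based on pseudocode from https://pseudoeditor.com/guides/binary-search
--     """
--     left = 0
--     right = len(seq_offset) - 1
--     while left <= right:
--         mid = (left + right) // 2
--         min_char_ind, max_char_ind = seq_offset[mid]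
--         if min_char_ind <= char and char < max_char_ind:
--             return mid
--         elif max_char_ind <= char:
--             left = mid + 1
--         else:
--             right = mid - 1
--     return -1  # This should not be returned under normal use.
-- ===== SOURCE B (Python) =====
-- def _search_within_seq_for_char(
--         seq_offset: list[tuple[int, int]],
--         char: int
--     ) -> int:
--     """Recursive divide-and-conquer binary search on sublists.
--
--     Recurses on the slice left or right of the midpoint, carrying the
--     base index of the current sublist; empty sublist returns -1.
--     """
--     def go(seq, base):
--         if not seq:
--             return -1
--         mid = (len(seq) - 1) // 2
--         min_char_ind, max_char_ind = seq[mid]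
--         if min_char_ind <= char and char < max_char_ind:
--             return base + mid
--         elif max_char_ind <= char:
--             return go(seq[mid + 1:], base + mid + 1)
--         else:
--             return go(seq[:mid], base)
--     return go(seq_offset, 0)
-- ===== Notes on version B (the rewrite author's own statement) =====
-- stated objective: alternative
-- what changed: Replaces A's iterative two-pointer (left,right) while-loop with a recursive divide-and-conquer on sublists: a helper recurses on the slice left or right of the midpoint, carrying the base index of the current sublist, with the empty sublist as the -1 base case.
import Mathlib
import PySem

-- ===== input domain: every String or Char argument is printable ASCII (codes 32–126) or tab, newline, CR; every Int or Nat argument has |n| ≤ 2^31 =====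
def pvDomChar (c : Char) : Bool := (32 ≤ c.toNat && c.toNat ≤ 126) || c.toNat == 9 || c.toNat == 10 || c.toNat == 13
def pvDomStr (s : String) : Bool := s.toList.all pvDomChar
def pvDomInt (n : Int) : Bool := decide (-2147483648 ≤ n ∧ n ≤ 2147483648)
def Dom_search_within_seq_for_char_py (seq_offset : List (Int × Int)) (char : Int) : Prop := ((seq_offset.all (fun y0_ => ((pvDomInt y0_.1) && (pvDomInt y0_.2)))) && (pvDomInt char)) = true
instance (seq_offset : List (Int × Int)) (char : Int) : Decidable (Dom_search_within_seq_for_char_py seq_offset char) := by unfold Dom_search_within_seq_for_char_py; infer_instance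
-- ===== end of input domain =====

-- B replaces A's iterative two-pointer while-loop by a recursive divide-and-conquer on
-- sublists (slices) carrying a base index; same exact results, alternative decomposition.

-- ===== PORT A =====
-- A's while-loop, state (left, right); tuple unpacking 'min, max = seq_offset[mid]' is .1/.2
def pvALoop (seq_offset : List (Int × Int)) (char left right : Int) : Int :=
  if h : left ≤ right then
    let mid := PySem.Int.floordiv (left + right) 2
    let p := PySem.List.pyGetD seq_offset mid (0, 0)  -- always in range: left ≤ mid ≤ right < len
    if p.1 ≤ char ∧ char < p.2 then mid
    else if p.2 ≤ char then pvALoop seq_offset char (mid + 1) right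
    else pvALoop seq_offset char left (mid - 1)
  else -1
termination_by (right + 1 - left).toNat
decreasing_by
  · have := PySem.Int.floordiv_two_mid_bounds h
    omega
  · have := PySem.Int.floordiv_two_mid_bounds h
    omega

def search_within_seq_for_char_py (seq_offset : List (Int × Int)) (char : Int) : Int :=
  pvALoop seq_offset char 0 ((seq_offset.length : Int) - 1)

-- ===== PORT B =====
-- B's inner 'go': recursion on a sublist together with its base index
def pvBGo (char : Int) (seq : List (Int × Int)) (base : Int) : Int :=
  if hseq : seq = [] then -1
  else
    let mid := PySem.Int.floordiv ((seq.length : Int) - 1) 2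
    let p := PySem.List.pyGetD seq mid (0, 0)  -- always in range: 0 ≤ mid < len
    if p.1 ≤ char ∧ char < p.2 then base + mid
    else if p.2 ≤ char then
      pvBGo char (PySem.List.slice seq (some (mid + 1)) none) (base + mid + 1)
    else
      pvBGo char (PySem.List.slice seq none (some mid)) base
termination_by seq.length
decreasing_by
  · have hpos : 0 < seq.length := List.length_pos_iff.mpr hseq
    have hmid : (0:Int) ≤ PySem.Int.floordiv ((seq.length : Int) - 1) 2 := by
      rw [PySem.Int.floordiv_eq_ediv_of_pos (by norm_num)]
      omega
    rw [PySem.List.slice_from seq (by omega)]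
    simp only [List.length_drop]
    omega
  · have hpos : 0 < seq.length := List.length_pos_iff.mpr hseq
    have hmid : (0:Int) ≤ PySem.Int.floordiv ((seq.length : Int) - 1) 2 := by
      rw [PySem.Int.floordiv_eq_ediv_of_pos (by norm_num)]
      omega
    have hlt : PySem.Int.floordiv ((seq.length : Int) - 1) 2 < (seq.length : Int) := by
      rw [PySem.Int.floordiv_eq_ediv_of_pos (by norm_num)]
      omega
    rw [PySem.List.slice_to seq hmid]
    simp only [List.length_take]
    omega

def search_within_seq_for_char_py_alt (seq_offset : List (Int × Int)) (char : Int) : Int :=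
  pvBGo char seq_offset 0

-- ===== PRECONDITION & SPEC =====
def Spec_search_within_seq_for_char_py (seq_offset : List (Int × Int)) (char : Int) (out : Int) : Prop := out = search_within_seq_for_char_py_alt seq_offset char
instance (seq_offset : List (Int × Int)) (char : Int) (out : Int) : Decidable (Spec_search_within_seq_for_char_py seq_offset char out) := by unfold Spec_search_within_seq_for_char_py; infer_instance

-- ===== CLAIM (what is proved, stated in full; the proofs are below) =====
def Claim_equal_search_within_seq_for_char_py : Prop := ∀ (seq_offset : List (Int × Int)) (char : Int), Dom_search_within_seq_for_char_py seq_offset char → Spec_search_within_seq_for_char_py seq_offset char (search_within_seq_for_char_py seq_offset char)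

-- ===== LEMMAS AND PROOFS =====

-- A's loop on window [left, right] equals B's recursion on the corresponding sublist with base = left.
theorem pvKey (seq : List (Int × Int)) (char left right : Int)
    (hl : 0 ≤ left) (hr : right < (seq.length : Int)) :
    pvALoop seq char left right
      = pvBGo char ((seq.drop left.toNat).take (right + 1 - left).toNat) left := by
  have hfd : ∀ a : Int, PySem.Int.floordiv a 2 = a / 2 := fun a =>
    PySem.Int.floordiv_eq_ediv_of_pos (by norm_num)
  by_cases h : left ≤ right
  · have hlen : ((seq.drop left.toNat).take (right + 1 - left).toNat).length
        = (right + 1 - left).toNat := by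
      simp only [List.length_take, List.length_drop]
      omega
    have hne : (seq.drop left.toNat).take (right + 1 - left).toNat ≠ [] := by
      intro hE
      rw [hE] at hlen
      simp only [List.length_nil] at hlen
      omega
    rw [pvALoop, pvBGo]
    rw [dif_pos h, dif_neg hne]
    simp only [hfd, hlen]
    -- the two midpoints address the same element of seq
    have hEq : PySem.List.pyGetD ((seq.drop left.toNat).take (right + 1 - left).toNat)
          ((((right + 1 - left).toNat : Int) - 1) / 2) (0, 0)
        = PySem.List.pyGetD seq ((left + right) / 2) (0, 0) := by
      have h1 : (0:Int) ≤ (((right + 1 - left).toNat : Int) - 1) / 2 := by omega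
      have h2 : (((right + 1 - left).toNat : Int) - 1) / 2
          < (((seq.drop left.toNat).take (right + 1 - left).toNat).length : Int) := by
        rw [hlen]; omega
      have h3 : (0:Int) ≤ (left + right) / 2 := by omega
      have h4 : (left + right) / 2 < (seq.length : Int) := by omega
      rw [PySem.List.pyGetD_eq_getElem _ _ h1 h2, PySem.List.pyGetD_eq_getElem _ _ h3 h4]
      rw [List.getElem_take, List.getElem_drop]
      congr 1
      omega
    rw [hEq]
    by_cases hc1 : (PySem.List.pyGetD seq ((left + right) / 2) (0, 0)).1 ≤ char
        ∧ char < (PySem.List.pyGetD seq ((left + right) / 2) (0, 0)).2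
    · rw [if_pos hc1, if_pos hc1]
      omega
    · rw [if_neg hc1, if_neg hc1]
      by_cases hc2 : (PySem.List.pyGetD seq ((left + right) / 2) (0, 0)).2 ≤ char
      · rw [if_pos hc2, if_pos hc2]
        have IH := pvKey seq char ((left + right) / 2 + 1) right (by omega) hr
        rw [IH]
        have eL : PySem.List.slice ((seq.drop left.toNat).take (right + 1 - left).toNat)
              (some ((((right + 1 - left).toNat : Int) - 1) / 2 + 1)) none
            = (seq.drop ((left + right) / 2 + 1).toNat).take
                (right + 1 - ((left + right) / 2 + 1)).toNat := by
          rw [PySem.List.slice_from _ (by omega)]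
          rw [List.drop_take, List.drop_drop]
          congr 1
          · omega
          · congr 1
            omega
        have eB : left + (((right + 1 - left).toNat : Int) - 1) / 2 + 1
            = (left + right) / 2 + 1 := by omega
        rw [eL, eB]
      · rw [if_neg hc2, if_neg hc2]
        have IH := pvKey seq char left ((left + right) / 2 - 1) hl (by omega)
        rw [IH]
        have eL : PySem.List.slice ((seq.drop left.toNat).take (right + 1 - left).toNat)
              none (some ((((right + 1 - left).toNat : Int) - 1) / 2))
            = (seq.drop left.toNat).take ((left + right) / 2 - 1 + 1 - left).toNat := by
          rw [PySem.List.slice_to _ (by omega)]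
          rw [List.take_take]
          congr 1
          omega
        rw [eL]
  · rw [pvALoop, pvBGo]
    rw [dif_neg h]
    have hE : (right + 1 - left).toNat = 0 := by omega
    rw [hE]
    simp only [List.take_zero]
    rw [dif_pos trivial]
termination_by (right + 1 - left).toNat
decreasing_by
  · omega
  · omega

-- ===== VERDICT (by name: the statement is the Claim_ definition above) =====
theorem search_within_seq_for_char_py_spec : Claim_equal_search_within_seq_for_char_py := by
  intro seq char _
  unfold Spec_search_within_seq_for_char_py search_within_seq_for_char_py search_within_seq_for_char_py_alt
  have h := pvKey seq char 0 ((seq.length : Int) - 1) le_rfl (by omega)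
  simpa using h
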